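-- pv_equiv track=rewrite | github.com/AlexSp8/Rosalind_problems | Bioinformatics_stronghold/biosequence.py | get_proteins_from_reading_frame
-- ===== SOURCE A (Python) =====
-- from typing import Optional, List, Dict
--
-- def get_proteins_from_reading_frame(rframe: str) -> List[str]:
--     """Extract proteins from a reading frame"""
--     proteins = []
--     for i in range(len(rframe)):
--         if rframe[i] == 'M':
--             protein = ''
--             for amino in rframe[i:]:
--                 if amino == '_':
--                     proteins.append(protein)
--                     break
--                 protein += amino
--     return proteins
-- ===== SOURCE B (Python) =====
-- def get_proteins_from_reading_frame(rframe: str):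
--     """Extract proteins from a reading frame (single right-to-left pass)."""
--     res = []
--     seg = None  # substring from current position up to the nearest stop seen so far, or None
--     for c in reversed(rframe):
--         if c == '_':
--             seg = ''
--         else:
--             if seg is not None:
--                 seg = c + seg
--             if c == 'M' and seg is not None:
--                 res.append(seg)
--     res.reverse()
--     return res
-- ===== Notes on version B (the rewrite author's own statement) =====
-- stated objective: alternative
-- what changed: Replaced the per-M rescan of the whole suffix with a single right-to-left pass that maintains the segment up to the nearest stop codon, appending it at each M and reversing the result.
import Mathlib
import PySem

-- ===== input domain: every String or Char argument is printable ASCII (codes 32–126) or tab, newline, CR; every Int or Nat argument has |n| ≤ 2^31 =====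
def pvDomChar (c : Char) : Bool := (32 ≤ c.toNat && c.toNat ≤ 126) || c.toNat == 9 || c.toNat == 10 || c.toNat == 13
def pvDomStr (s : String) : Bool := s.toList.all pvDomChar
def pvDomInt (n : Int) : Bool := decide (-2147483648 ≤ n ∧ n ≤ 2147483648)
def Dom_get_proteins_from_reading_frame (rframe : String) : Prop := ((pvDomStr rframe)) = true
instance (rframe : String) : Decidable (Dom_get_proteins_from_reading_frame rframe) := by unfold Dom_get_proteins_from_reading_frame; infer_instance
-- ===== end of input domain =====

-- B replaces A's per-M rescan of the suffix by one right-to-left pass maintaining the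
-- segment up to the nearest stop codon (objective: alternative single-pass decomposition).

-- ===== PORT A =====
-- inner loop: 'for amino in rframe[i:]: if amino == '_': proteins.append(protein); break; protein += amino'
def pvAInner : List Char → List Char → List (List Char) → List (List Char)
  | [], _, ps => ps
  | a :: rest, protein, ps =>
      if a = '_' then ps ++ [protein] else pvAInner rest (protein ++ [a]) ps

def get_proteins_from_reading_frame (rframe : String) : List String :=
  ((PySem.List.pyRange 0 rframe.toList.length 1).foldl
    (fun ps i =>
      if PySem.List.pyGet? rframe.toList i = some 'M' then
        pvAInner (PySem.List.slice rframe.toList (some i) none) [] ps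
      else ps) []).map String.mk

-- ===== PORT B =====
-- one step of B's right-to-left loop: state = (segment up to nearest stop, results so far)
def pvBStep : (Option (List Char) × List (List Char)) → Char → (Option (List Char) × List (List Char))
  | (seg, res), c =>
    if c = '_' then (some [], res)
    else
      let seg' := seg.map (c :: ·)
      match seg' with
      | some p => if c = 'M' then (seg', res ++ [p]) else (seg', res)
      | none => (seg', res)

def get_proteins_from_reading_frame_alt (rframe : String) : List String :=
  ((rframe.toList.reverse.foldl pvBStep (none, [])).2.reverse).map String.mk

-- ===== PRECONDITION & SPEC =====
def Spec_get_proteins_from_reading_frame (rframe : String) (out : List String) : Prop := out = get_proteins_from_reading_frame_alt rframe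
instance (rframe : String) (out : List String) : Decidable (Spec_get_proteins_from_reading_frame rframe out) := by unfold Spec_get_proteins_from_reading_frame; infer_instance

-- ===== CLAIM (what is proved, stated in full; the proofs are below) =====
def Claim_equal_get_proteins_from_reading_frame : Prop := ∀ (rframe : String), Dom_get_proteins_from_reading_frame rframe → Spec_get_proteins_from_reading_frame rframe (get_proteins_from_reading_frame rframe)

-- ===== LEMMAS AND PROOFS =====

-- common characterisation: the proteins emitted, leftmost M first
def pvEmit : List Char → List (List Char)
  | [] => []
  | c :: rest =>
      (if c = 'M' ∧ '_' ∈ (c :: rest) then [(c :: rest).takeWhile (· ≠ '_')] else []) ++ pvEmit rest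

lemma pvAInner_eq (cs : List Char) : ∀ (protein : List Char) (ps : List (List Char)),
    pvAInner cs protein ps =
      if '_' ∈ cs then ps ++ [protein ++ cs.takeWhile (· ≠ '_')] else ps := by
  induction cs with
  | nil => intro protein ps; simp [pvAInner]
  | cons a rest ih =>
      intro protein ps
      by_cases ha : a = '_'
      · subst ha; simp [pvAInner, List.takeWhile]
      · simp [pvAInner, ha, ih, List.takeWhile, Ne.symm ha]

lemma pvALoop_eq (l : List Char) : ∀ (n a : Nat), a + n = l.length → ∀ ps,
    (PySem.List.pyRange a l.length 1).foldl
      (fun ps i =>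
        if PySem.List.pyGet? l i = some 'M' then
          pvAInner (PySem.List.slice l (some i) none) [] ps
        else ps) ps = ps ++ pvEmit (l.drop a) := by
  intro n
  induction n with
  | zero =>
      intro a ha ps
      rw [PySem.List.pyRange_one_eq_nil (by omega)]
      have h0 : a = l.length := by omega
      subst h0
      simp [pvEmit, List.drop_length]
  | succ n ih =>
      intro a ha ps
      have hlt : a < l.length := by omega
      rw [PySem.List.pyRange_one_cons (by exact_mod_cast hlt)]
      simp only [List.foldl_cons]
      have hcast : ((a : Int) + 1) = ((a + 1 : Nat) : Int) := by push_cast; ring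
      rw [hcast, ih (a + 1) (by omega)]
      have hdrop : l.drop a = l[a] :: l.drop (a + 1) := List.drop_eq_getElem_cons hlt
      rw [PySem.List.pyGet?_natCast, PySem.List.slice_from_natCast]
      rw [hdrop]
      by_cases hM : l[a] = 'M'
      · simp only [hM, List.getElem?_eq_getElem hlt, hM, if_pos rfl]
        rw [pvAInner_eq]
        simp only [pvEmit, hM, true_and, List.nil_append]
        split_ifs <;> simp
      · have : l[a]? = some l[a] := List.getElem?_eq_getElem hlt
        simp only [this, Option.some.injEq, hM, if_neg hM, pvEmit]
        simp [hM]

-- B's fold computes (segment to nearest stop, pvEmit reversed)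
def pvSeg (l : List Char) : Option (List Char) :=
  if '_' ∈ l then some (l.takeWhile (· ≠ '_')) else none

lemma pvBFold_eq (l : List Char) :
    l.reverse.foldl pvBStep (none, []) = (pvSeg l, (pvEmit l).reverse) := by
  rw [List.foldl_reverse]
  induction l with
  | nil => simp [pvSeg, pvEmit]
  | cons c rest ih =>
      rw [List.foldr_cons, ih]
      by_cases hc : c = '_'
      · subst hc
        simp [pvBStep, pvSeg, pvEmit, List.takeWhile]
      · have hmem : '_' ∈ (c :: rest) ↔ '_' ∈ rest := by
          constructor
          · intro h; rcases List.mem_cons.mp h with h | h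
            · exact absurd h.symm hc
            · exact h
          · exact fun h => List.mem_cons_of_mem _ h
        have htw : (c :: rest).takeWhile (· ≠ '_') = c :: rest.takeWhile (· ≠ '_') := by
          simp [List.takeWhile, hc]
        by_cases hs : '_' ∈ rest
        · simp only [pvBStep, if_neg hc, pvSeg, if_pos hs, Option.map_some]
          by_cases hM : c = 'M'
          · simp [hM, pvSeg, pvEmit, hmem, hs, htw]
          · simp [hM, pvSeg, pvEmit, hmem, hs, hc]
        · simp only [pvBStep, if_neg hc, pvSeg, if_neg hs, Option.map_none]
          have : ¬ '_' ∈ (c :: rest) := fun h => hs (hmem.mp h)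
          by_cases hM : c = 'M' <;> simp [pvEmit, this, hs, hM]

-- ===== VERDICT (by name: the statement is the Claim_ definition above) =====
theorem get_proteins_from_reading_frame_spec : Claim_equal_get_proteins_from_reading_frame := by
  intro rframe _
  unfold Spec_get_proteins_from_reading_frame
  unfold get_proteins_from_reading_frame get_proteins_from_reading_frame_alt
  rw [pvBFold_eq]
  have hA := pvALoop_eq rframe.toList rframe.toList.length 0 (by omega) []
  simp only [Nat.cast_zero] at hA
  rw [hA]
  simp
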